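-- pv_equiv track=rewrite | github.com/NotRobiin/challenges | python/first_letter_shift.py | shift_sentence
-- ===== SOURCE A (Python) =====
-- def shift_sentence(source: str) -> str:
--     words = source.split(" ")
--
--     if len(words) == 1:
--         return source
--
--     first_letters = [w[0] for w in words]
--     last = first_letters[-1]
--     first_letters.pop(len(first_letters) - 1)
--     first_letters.insert(0, last)
--
--     return " ".join(
--         "%s%s" % (first_letters[i], words[i][1:]) for i in range(len(words))
--     )
-- ===== SOURCE B (Python) =====
-- def shift_sentence(source: str) -> str:
--     words = source.split(" ")
--
--     if len(words) == 1:
--         return source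
--
--     carry = words[-1][0]
--     out = []
--     for w in words:
--         out.append(carry + w[1:])
--         carry = w[0]
--     return " ".join(out)
-- ===== Notes on version B (the rewrite author's own statement) =====
-- stated objective: simpler
-- what changed: Instead of building a list of first letters and rotating it with pop/insert before a final indexed join, B makes a single pass threading the previous word's first letter through a carry variable.
import Mathlib
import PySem

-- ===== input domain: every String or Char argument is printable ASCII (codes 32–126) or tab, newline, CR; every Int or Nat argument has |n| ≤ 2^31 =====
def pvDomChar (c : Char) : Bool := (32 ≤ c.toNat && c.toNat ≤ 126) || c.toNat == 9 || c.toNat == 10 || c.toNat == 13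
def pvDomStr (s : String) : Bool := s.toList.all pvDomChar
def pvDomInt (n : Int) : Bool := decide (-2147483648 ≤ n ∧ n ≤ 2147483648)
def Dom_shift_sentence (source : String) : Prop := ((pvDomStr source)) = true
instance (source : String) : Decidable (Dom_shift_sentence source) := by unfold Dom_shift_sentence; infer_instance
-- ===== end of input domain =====

-- B replaces A's build-then-rotate (pop/insert) of the first-letters list by a single pass with a carry variable; same O(n) cost, simpler.


-- ===== PORT A =====
def shift_sentence (source : String) : String :=
  let words := PySem.Chars.splitOn source.toList [' ']
  if words.length = 1 then source
  else
    let first_letters := words.map (fun w => PySem.List.pyGetD w 0 ' ')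
    let last := PySem.List.pyGetD first_letters (-1) ' '
    let fl1 := ((PySem.List.pop? first_letters ((first_letters.length : Int) - 1)).map Prod.snd).getD []
    let fl2 := PySem.List.insert fl1 0 last
    String.mk (PySem.Chars.join [' ']
      ((PySem.List.pyRange 0 (words.length : Int) 1).map
        (fun i => PySem.List.pyGetD fl2 i ' ' :: PySem.List.slice (PySem.List.pyGetD words i []) (some 1) none)))

-- ===== PORT B =====
def shift_sentence_alt (source : String) : String :=
  let words := PySem.Chars.splitOn source.toList [' ']
  if words.length = 1 then source
  else
    let carry0 := PySem.List.pyGetD (PySem.List.pyGetD words (-1) []) 0 ' '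
    let res := words.foldl
      (fun st w => (st.1 ++ [st.2 :: PySem.List.slice w (some 1) none], PySem.List.pyGetD w 0 ' '))
      (([] : List (List Char)), carry0)
    String.mk (PySem.Chars.join [' '] res.1)

-- ===== PRECONDITION & SPEC =====
-- Pre_ excludes exactly the inputs on which A raises IndexError: a multi-word split containing
-- an empty word (adjacent/leading/trailing spaces), where w[0] fails; B raises there too.
def Pre_shift_sentence (source : String) : Prop :=
  (PySem.Chars.splitOn source.toList [' ']).length = 1 ∨
  (PySem.Chars.splitOn source.toList [' '] ≠ [] ∧
   ∀ w ∈ PySem.Chars.splitOn source.toList [' '], w ≠ [])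
instance (source : String) : Decidable (Pre_shift_sentence source) := by
  unfold Pre_shift_sentence; infer_instance

def pvWitness_shift_sentence : String := "ab cd ef"

def Spec_shift_sentence (source : String) (out : String) : Prop := out = shift_sentence_alt source
instance (source : String) (out : String) : Decidable (Spec_shift_sentence source out) := by unfold Spec_shift_sentence; infer_instance

-- ===== CLAIM (what is proved, stated in full; the proofs are below) =====
def Claim_equal_shift_sentence : Prop := ∀ (source : String), Dom_shift_sentence source → Pre_shift_sentence source → Spec_shift_sentence source (shift_sentence source)

-- ===== LEMMAS AND PROOFS =====

lemma insert_zero {α : Type} (xs : List α) (x : α) : PySem.List.insert xs 0 x = x :: xs := by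
  simp [PySem.List.insert, PySem.List.sliceIndices]

-- indexed map over range 0..len = zipWith, when the two lists have equal length
lemma map_range_zipWith {α β γ : Type} (f : α → β → γ) (da : α) (db : β) :
    ∀ (xs : List α) (ys : List β), xs.length = ys.length →
      (List.range ys.length).map (fun k => f (xs.getD k da) (ys.getD k db)) =
        List.zipWith f xs ys := by
  intro xs
  induction xs with
  | nil => intro ys h; cases ys with
    | nil => simp
    | cons y ys => simp at h
  | cons x xs ih =>
    intro ys h
    cases ys with
    | nil => simp at h
    | cons y ys =>
      simp only [List.length_cons] at h ⊢
      rw [List.range_succ_eq_map]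
      simp only [List.map_cons, List.map_map]
      have := ih ys (by omega)
      simp only [List.getD_cons_zero, List.zipWith_cons_cons]
      rw [← this]
      rfl

-- the carry fold of B, characterised by zipWith against the rotated first-letter list
lemma fold_carry {α β γ : Type} (f : β → α → γ) (g : α → β) :
    ∀ (ws : List α) (c : β) (acc : List γ),
      (ws.foldl (fun st w => (st.1 ++ [f st.2 w], g w)) (acc, c)).1 =
        acc ++ List.zipWith (fun a b => f a b) (c :: (ws.map g).dropLast) ws := by
  intro ws
  induction ws with
  | nil => intro c acc; simp
  | cons w ws ih =>
    intro c acc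
    simp only [List.foldl_cons]
    rw [ih (g w) (acc ++ [f c w])]
    cases ws with
    | nil => simp
    | cons v vs =>
      simp only [List.map_cons, List.dropLast_cons_of_ne_nil (by simp : (g v :: List.map g vs) ≠ []),
        List.zipWith_cons_cons, List.append_assoc, List.singleton_append]

lemma pyGetD_neg_one_getLast? {α : Type} (xs : List α) (d : α) :
    PySem.List.pyGetD xs (-1) d = xs.getLast?.getD d := by
  simp [PySem.List.pyGetD, PySem.List.pyGet?_neg_one]

-- the core equality of the two else-branches, over an arbitrary nonempty word list
lemma shift_core (words : List (List Char)) (hne : words ≠ []) :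
    (PySem.List.pyRange 0 (words.length : Int) 1).map
      (fun i => PySem.List.pyGetD
          (PySem.List.insert
            (((PySem.List.pop? (words.map (fun w => PySem.List.pyGetD w 0 ' '))
                (((words.map (fun w => PySem.List.pyGetD w 0 ' ')).length : Int) - 1)).map Prod.snd).getD [])
            0 (PySem.List.pyGetD (words.map (fun w => PySem.List.pyGetD w 0 ' ')) (-1) ' ')) i ' '
        :: PySem.List.slice (PySem.List.pyGetD words i []) (some 1) none)
    = (words.foldl
        (fun st w => (st.1 ++ [st.2 :: PySem.List.slice w (some 1) none], PySem.List.pyGetD w 0 ' '))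
        (([] : List (List Char)), PySem.List.pyGetD (PySem.List.pyGetD words (-1) []) 0 ' ')).1 := by
  obtain ⟨l, hl⟩ : ∃ l, words.getLast? = some l := by
    cases hx : words.getLast? with
    | none => exact absurd (List.getLast?_eq_none_iff.mp hx) hne
    | some l => exact ⟨l, rfl⟩
  set g : List Char → Char := fun w => PySem.List.pyGetD w 0 ' ' with hg
  have hflen : (words.map g).length = words.length := by simp
  have hlen1 : 1 ≤ words.length := by
    cases words with
    | nil => exact absurd rfl hne
    | cons _ _ => simp
  -- A's rotated first-letter list is g l :: (words.map g).dropLast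
  have hlast : PySem.List.pyGetD (words.map g) (-1) ' ' = g l := by
    rw [pyGetD_neg_one_getLast?, List.getLast?_map, hl]; rfl
  have hcast : (((words.map g).length : Int) - 1) = (((words.map g).length - 1 : Nat) : Int) := by
    rw [hflen]; omega
  have hpop : ((PySem.List.pop? (words.map g) (((words.map g).length : Int) - 1)).map Prod.snd).getD []
      = (words.map g).dropLast := by
    rw [hcast, PySem.List.pop?_natCast (words.map g) ((words.map g).length - 1) (by omega)]
    simp only [Option.map_some, Option.getD_some]
    rw [List.eraseIdx_length_sub_one]
  -- B's initial carry equals the same g l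
  have hcarry : PySem.List.pyGetD (PySem.List.pyGetD words (-1) []) 0 ' ' = g l := by
    rw [pyGetD_neg_one_getLast?, hl]; rfl
  rw [hpop, hlast, insert_zero, hcarry]
  rw [fold_carry (fun a w => a :: PySem.List.slice w (some 1) none) g words (g l) []]
  rw [PySem.List.pyRange_zero_natCast, List.map_map]
  have hlen2 : (g l :: (words.map g).dropLast).length = words.length := by
    simp only [List.length_cons, List.length_dropLast, hflen]; omega
  rw [← map_range_zipWith (fun a w => a :: PySem.List.slice w (some 1) none) ' ' []
      (g l :: (words.map g).dropLast) words hlen2]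
  simp only [List.nil_append]
  apply List.map_congr_left
  intro k _
  simp [PySem.List.pyGetD_natCast]

-- ===== VERDICT (by name: the statement is the Claim_ definition above) =====
theorem shift_sentence_spec : Claim_equal_shift_sentence := by
  intro source _ hpre
  unfold Spec_shift_sentence shift_sentence shift_sentence_alt
  by_cases h1 : (PySem.Chars.splitOn source.toList [' ']).length = 1
  · simp [h1]
  · simp only [h1, if_false]
    rcases hpre with h | ⟨hne, _⟩
    · exact absurd h h1
    exact congrArg (fun l => String.mk (PySem.Chars.join [' '] l))
      (shift_core (PySem.Chars.splitOn source.toList [' ']) hne)
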